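-- pv_equiv track=rewrite | github.com/sarveshbhatnagar/CompetetiveProgramming | multiprocessesor.py | multiProcessorSolution
-- ===== SOURCE A (Python) =====
-- from bisect import bisect_left
-- from math import floor
--
-- def multiProcessorSolution(processors, processes):
--     arr = sorted(processors)
--     count = 0
--     while True:
--         count += 1
--         p = arr.pop()
--         processes -= p
--         p = floor(p/2)
--         i = bisect_left(arr, p)
--         arr.insert(i, p)
--         if(processes <= 0):
--             break
--     return count
-- ===== SOURCE B (Python) =====
-- def multiProcessorSolution(processors, processes):
--     # All values the greedy will ever pop are the halving chains of the inputs,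
--     # and it pops them in descending order: expand, sort once, scan.
--     vals = []
--     for p in processors:
--         while p > 0:
--             vals.append(p)
--             p //= 2
--     vals.sort(reverse=True)
--     count = 0
--     for v in vals:
--         count += 1
--         processes -= v
--         if processes <= 0:
--             return count
--     return count + 1
-- ===== Notes on version B (the rewrite author's own statement) =====
-- stated objective: alternative
-- what changed: Instead of simulating rounds with pop-max and a linear sorted reinsert per round, B expands each processor into its full halving chain up front, sorts all chain values descending once, and scans them subtracting until processes is depleted (the greedy pop sequence is exactly that descending enumeration); it trades per-round reinsert work for a one-off expansion of all chains.
import Mathlib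
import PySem

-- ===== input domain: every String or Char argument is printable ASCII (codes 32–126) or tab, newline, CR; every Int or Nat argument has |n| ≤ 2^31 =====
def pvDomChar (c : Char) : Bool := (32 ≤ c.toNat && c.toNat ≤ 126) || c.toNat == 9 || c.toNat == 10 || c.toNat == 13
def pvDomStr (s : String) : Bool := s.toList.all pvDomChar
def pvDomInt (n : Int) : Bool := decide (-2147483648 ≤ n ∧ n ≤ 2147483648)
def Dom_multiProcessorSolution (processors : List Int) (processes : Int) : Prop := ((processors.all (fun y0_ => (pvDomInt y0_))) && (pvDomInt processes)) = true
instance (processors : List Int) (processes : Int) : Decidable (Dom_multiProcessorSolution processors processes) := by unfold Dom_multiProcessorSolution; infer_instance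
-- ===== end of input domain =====

-- B replaces A's round-by-round pop-max / linear reinsert simulation by: expand each
-- processor into its halving chain, sort all chain values descending once, scan. (alternative)

-- halving chain of p: [p, p//2, p//4, …] while positive (used by B, and by A's port only
-- as a fuel bound and by Pre_ as the total extractable capacity)
def chain (p : Int) : List Int :=
  if h : 0 < p then p :: chain (PySem.Int.floordiv p 2) else []
termination_by p.toNat
decreasing_by
  have h2 : PySem.Int.floordiv p 2 = p / 2 := PySem.Int.floordiv_eq_ediv_of_pos (by omega)
  rw [h2]; omega

-- ===== PORT A =====
-- the while-True loop; fuel only makes the recursion total (Python diverges outside Pre_);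
-- pop? none (empty list) is Python's IndexError, excluded by Pre_
def aGo (fuel : Nat) (arr : List Int) (processes : Int) (count : Int) : Int :=
  match fuel with
  | 0 => count
  | fuel + 1 =>
    let count := count + 1
    match PySem.List.pop? arr with
    | none => count
    | some (p, arr) =>
      let processes := processes - p
      -- floor(p/2) on ints with |p| ≤ 2^31 is exact floor division
      let p := PySem.Int.floordiv p 2
      let i := PySem.List.bisectLeft arr p
      let arr := PySem.List.insert arr (i : Int) p
      if processes ≤ 0 then count else aGo fuel arr processes count

def multiProcessorSolution (processors : List Int) (processes : Int) : Int :=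
  aGo ((processors.flatMap chain).length + 1) (PySem.List.sorted processors (fun x => x)) processes 0

-- ===== PORT B =====
def bGo (vals : List Int) (processes : Int) (count : Int) : Int :=
  match vals with
  | [] => count + 1
  | v :: rest =>
    let count := count + 1
    let processes := processes - v
    if processes ≤ 0 then count else bGo rest processes count

def multiProcessorSolution_alt (processors : List Int) (processes : Int) : Int :=
  bGo (PySem.List.sorted (processors.flatMap chain) (fun x => x) true) processes 0

-- ===== PRECONDITION & SPEC =====
-- Pre_ excludes exactly the inputs where A does not return: the empty list (IndexError) and
-- the inputs where the loop never drives processes ≤ 0 (A diverges there): A terminates iff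
-- some processor already covers processes, or processes is positive and at most the total
-- halving capacity Σ (p + p//2 + …), which in closed form is Σ over positive p of 2p − bitCount p.
def Pre_multiProcessorSolution (processors : List Int) (processes : Int) : Prop :=
  processors ≠ [] ∧
    ((∃ p ∈ processors, processes ≤ p) ∨
      (0 < processes ∧
        processes ≤ (processors.map
          (fun p => if 0 < p then 2 * p - (PySem.Int.bitCount p : Int) else 0)).sum))
instance (processors : List Int) (processes : Int) : Decidable (Pre_multiProcessorSolution processors processes) := by unfold Pre_multiProcessorSolution; infer_instance
def pvWitness_multiProcessorSolution : List Int × Int := ([5, 3], 7)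
def Spec_multiProcessorSolution (processors : List Int) (processes : Int) (out : Int) : Prop := out = multiProcessorSolution_alt processors processes
instance (processors : List Int) (processes : Int) (out : Int) : Decidable (Spec_multiProcessorSolution processors processes out) := by unfold Spec_multiProcessorSolution; infer_instance

-- ===== CLAIM (what is proved, stated in full; the proofs are below) =====
def Claim_equal_multiProcessorSolution : Prop := ∀ (processors : List Int) (processes : Int), Dom_multiProcessorSolution processors processes → Pre_multiProcessorSolution processors processes → Spec_multiProcessorSolution processors processes (multiProcessorSolution processors processes)

-- ===== LEMMAS AND PROOFS =====

theorem chain_of_pos {p : Int} (h : 0 < p) : chain p = p :: chain (PySem.Int.floordiv p 2) := by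
  rw [chain]; simp [h]

theorem chain_of_nonpos {p : Int} (h : p ≤ 0) : chain p = [] := by
  rw [chain]; simp; omega

theorem mem_chain_le {q p : Int} (hq : q ∈ chain p) : q ≤ p := by
  by_cases h : 0 < p
  · rw [chain_of_pos h] at hq
    rcases List.mem_cons.mp hq with rfl | hq
    · exact le_refl _
    · have h2 : PySem.Int.floordiv p 2 = p / 2 := PySem.Int.floordiv_eq_ediv_of_pos (by omega)
      have := mem_chain_le hq
      rw [h2] at this; omega
  · rw [chain_of_nonpos (by omega)] at hq; simp at hq
termination_by p.toNat
decreasing_by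
  have h2 : PySem.Int.floordiv p 2 = p / 2 := PySem.Int.floordiv_eq_ediv_of_pos (by omega)
  rw [h2]; omega

theorem chain_sum (p : Int) :
    (chain p).sum = if 0 < p then 2 * p - (PySem.Int.bitCount p : Int) else 0 := by
  by_cases h : 0 < p
  · have h2 : PySem.Int.floordiv p 2 = p / 2 := PySem.Int.floordiv_eq_ediv_of_pos (by omega)
    have hm : PySem.Int.mod p 2 = p % 2 := PySem.Int.mod_eq_emod_of_pos (by omega)
    rw [chain_of_pos h, List.sum_cons, chain_sum (PySem.Int.floordiv p 2),
        PySem.Int.bitCount_of_pos h, hm, h2]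
    by_cases h1 : 0 < p / 2
    · rw [if_pos h, if_pos h1]; push_cast; omega
    · rw [if_pos h, if_neg h1]
      have hp1 : p = 1 := by omega
      subst hp1; decide
  · rw [chain_of_nonpos (by omega), if_neg h]; rfl
termination_by p.toNat
decreasing_by
  have h2 : PySem.Int.floordiv p 2 = p / 2 := PySem.Int.floordiv_eq_ediv_of_pos (by omega)
  rw [h2]; omega

theorem flatMap_chain_sum (l : List Int) :
    (l.flatMap chain).sum =
      (l.map (fun p => if 0 < p then 2 * p - (PySem.Int.bitCount p : Int) else 0)).sum := by
  induction l with
  | nil => rfl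
  | cons x xs ih => simp [List.flatMap_cons, chain_sum, ih]

theorem sortDesc_congr_of_perm (xs ys : List Int) (h : xs.Perm ys) :
    PySem.List.sorted xs (fun x => x) true = PySem.List.sorted ys (fun x => x) true := by
  refine List.Perm.eq_of_pairwise (le := fun a b : Int => b ≤ a) (fun a b _ _ h1 h2 => le_antisymm h2 h1)
    (PySem.List.sorted_pairwise_rev xs (fun x => x)) (PySem.List.sorted_pairwise_rev ys (fun x => x))
    (((PySem.List.sorted_perm xs _ true).trans h).trans (PySem.List.sorted_perm ys _ true).symm)

-- naming the descending sort: M :: sortedDesc zs is sortedDesc of any permutation of M :: zs when M bounds zs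
theorem sortDesc_cons_max {M : Int} {xs zs : List Int}
    (hperm : xs.Perm (M :: zs)) (hM : ∀ y ∈ zs, y ≤ M) :
    PySem.List.sorted xs (fun x => x) true = M :: PySem.List.sorted zs (fun x => x) true := by
  refine List.Perm.eq_of_pairwise (le := fun a b : Int => b ≤ a) (fun a b _ _ h1 h2 => le_antisymm h2 h1)
    (PySem.List.sorted_pairwise_rev xs (fun x => x)) ?_ ?_
  · refine List.pairwise_cons.mpr ⟨?_, PySem.List.sorted_pairwise_rev zs (fun x => x)⟩
    intro y hy
    exact hM y ((PySem.List.mem_sorted zs (fun x => x) true y).mp hy)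
  · exact ((PySem.List.sorted_perm xs _ true).trans hperm).trans
      ((PySem.List.sorted_perm zs _ true).cons M).symm

theorem insert_sorted_facts (ys : List Int) (h : Int) (hs : ys.Pairwise (· ≤ ·)) :
    (PySem.List.insert ys ((PySem.List.bisectLeft ys h : Nat) : Int) h).Perm (h :: ys) ∧
      (PySem.List.insert ys ((PySem.List.bisectLeft ys h : Nat) : Int) h).Pairwise (· ≤ ·) := by
  obtain ⟨hle, hlt, hge⟩ := PySem.List.bisectLeft_spec ys h hs
  rw [PySem.List.insert_natCast ys (PySem.List.bisectLeft ys h) h hle]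
  constructor
  · exact List.perm_middle.trans (by rw [List.take_append_drop])
  · rw [List.pairwise_append]
    refine ⟨List.Pairwise.sublist (List.take_sublist _ ys) hs, ?_, ?_⟩
    · refine List.pairwise_cons.mpr ⟨?_, List.Pairwise.sublist (List.drop_sublist _ ys) hs⟩
      intro b hb
      obtain ⟨j, hj, rfl⟩ := List.mem_drop_iff_getElem.mp hb
      exact hge (PySem.List.bisectLeft ys h + j) (by omega) (by omega)
    · intro a ha b hb
      obtain ⟨j, hj, rfl⟩ := List.mem_take_iff_getElem.mp ha
      have hah : ys[j] < h := hlt j (by omega) (by omega)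
      rcases List.mem_cons.mp hb with rfl | hb
      · exact le_of_lt hah
      · obtain ⟨k, hk, rfl⟩ := List.mem_drop_iff_getElem.mp hb
        exact le_trans (le_of_lt hah) (hge _ (by omega) (by omega))

theorem mem_flatMap_chain_le {y M : Int} {l : List Int} (hy : y ∈ l.flatMap chain)
    (hM : ∀ x ∈ l, x ≤ M) : y ≤ M := by
  obtain ⟨x, hx, hyx⟩ := List.mem_flatMap.mp hy
  exact le_trans (mem_chain_le hyx) (hM x hx)

theorem main_lemma (fuel : Nat) (arr : List Int) (processes count : Int)
    (hs : arr.Pairwise (· ≤ ·)) (hne : arr ≠ [])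
    (hterm : (∃ p ∈ arr, processes ≤ p) ∨
      (0 < processes ∧ processes ≤ (arr.flatMap chain).sum))
    (hfuel : (arr.flatMap chain).length + 1 ≤ fuel) :
    aGo fuel arr processes count =
      bGo (PySem.List.sorted (arr.flatMap chain) (fun x => x) true) processes count := by
  induction fuel generalizing arr processes count with
  | zero => omega
  | succ f ih =>
    rcases List.eq_nil_or_concat arr with rfl | ⟨ys, M, rfl⟩
    · exact absurd rfl hne
    rw [List.concat_eq_append] at *
    have hsy : ys.Pairwise (· ≤ ·) := (List.pairwise_append.mp hs).1
    have hMmax : ∀ x ∈ ys, x ≤ M := by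
      intro x hx
      exact (List.pairwise_append.mp hs).2.2 x hx M (by simp)
    have hchains : (ys ++ [M]).flatMap chain = ys.flatMap chain ++ chain M := by
      simp [List.flatMap_append]
    have haGo : aGo (f + 1) (ys ++ [M]) processes count =
        (if processes - M ≤ 0 then count + 1 else
          aGo f (PySem.List.insert ys ((PySem.List.bisectLeft ys (PySem.Int.floordiv M 2) : Nat) : Int)
            (PySem.Int.floordiv M 2)) (processes - M) (count + 1)) := by
      simp only [aGo, PySem.List.pop?_last]
    by_cases hM : 0 < M
    · -- M positive: the head of the descending chain list is M itself
      have h2eq : PySem.Int.floordiv M 2 = M / 2 := PySem.Int.floordiv_eq_ediv_of_pos (by omega)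
      have h2le : PySem.Int.floordiv M 2 ≤ M := by rw [h2eq]; omega
      have hchM : chain M = M :: chain (PySem.Int.floordiv M 2) := chain_of_pos hM
      obtain ⟨hipm, hips⟩ := insert_sorted_facts ys (PySem.Int.floordiv M 2) hsy
      set h2 := PySem.Int.floordiv M 2 with hh2
      set arr' := PySem.List.insert ys ((PySem.List.bisectLeft ys h2 : Nat) : Int) h2 with harr'
      have hfm' : (arr'.flatMap chain).Perm (chain h2 ++ ys.flatMap chain) := by
        refine (List.Perm.flatMap_right chain hipm).trans ?_
        simp
      have hbig : (((ys ++ [M]).flatMap chain)).Perm (M :: arr'.flatMap chain) := by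
        rw [hchains, hchM]
        refine List.perm_middle.trans ?_
        exact (List.perm_append_comm.trans hfm'.symm).cons M
      have hboundM : ∀ y ∈ arr'.flatMap chain, y ≤ M := by
        intro y hy
        have hy' : y ∈ chain h2 ++ ys.flatMap chain := hfm'.mem_iff.mp hy
        rcases List.mem_append.mp hy' with hy' | hy'
        · exact le_trans (mem_chain_le hy') h2le
        · exact mem_flatMap_chain_le hy' hMmax
      have hsortEq : PySem.List.sorted ((ys ++ [M]).flatMap chain) (fun x => x) true =
          M :: PySem.List.sorted (arr'.flatMap chain) (fun x => x) true :=
        sortDesc_cons_max hbig hboundM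
      rw [haGo, hsortEq]
      by_cases hP : processes - M ≤ 0
      · simp [bGo, hP]
      · simp only [bGo, if_neg hP]
        refine ih arr' (processes - M) (count + 1) hips ?_ ?_ ?_
        · have : arr'.length = ys.length + 1 := by rw [hipm.length_eq]; simp
          intro hcon; rw [hcon] at this; simp at this
        · right
          constructor
          · omega
          · have hsum : processes ≤ ((ys ++ [M]).flatMap chain).sum := by
              rcases hterm with ⟨p, hp, hpp⟩ | ⟨_, hsum⟩
              · exfalso
                rcases List.mem_append.mp hp with hp | hp
                · exact hP (by have := hMmax p hp; omega)
                · simp at hp; omega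
              · exact hsum
            have := hbig.sum_eq
            simp only [List.sum_cons] at this
            omega
        · have := hbig.length_eq
          simp only [List.length_cons] at this
          omega
    · -- M ≤ 0: every element is ≤ 0, all chains are empty, and both sides give count + 1
      have hallnil : (ys ++ [M]).flatMap chain = [] := by
        refine List.flatMap_eq_nil_iff.mpr ?_
        intro x hx
        rcases List.mem_append.mp hx with hx | hx
        · exact chain_of_nonpos (le_trans (hMmax x hx) (by omega))
        · simp at hx; exact chain_of_nonpos (by omega)
      have hP : processes - M ≤ 0 := by
        rcases hterm with ⟨p, hp, hpp⟩ | ⟨hpos, hsum⟩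
        · rcases List.mem_append.mp hp with hp | hp
          · have := hMmax p hp; omega
          · simp at hp; omega
        · rw [hallnil] at hsum; simp at hsum; omega
      rw [haGo, if_pos hP, hallnil]
      have : PySem.List.sorted ([] : List Int) (fun x => x) true = [] :=
        (PySem.List.sorted_eq_nil_iff [] (fun x => x) true).mpr rfl
      rw [this]
      simp [bGo]

-- ===== VERDICT (by name: the statement is the Claim_ definition above) =====
theorem multiProcessorSolution_spec : Claim_equal_multiProcessorSolution := by
  intro processors processes _ hpre
  obtain ⟨hne, hterm⟩ := hpre
  unfold Spec_multiProcessorSolution multiProcessorSolution multiProcessorSolution_alt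
  have hperm : (PySem.List.sorted processors (fun x => x)).Perm processors :=
    PySem.List.sorted_perm processors (fun x => x) false
  have hfm : ((PySem.List.sorted processors (fun x => x)).flatMap chain).Perm
      (processors.flatMap chain) := List.Perm.flatMap_right chain hperm
  rw [main_lemma _ _ processes 0
      (PySem.List.sorted_pairwise processors (fun x => x))
      (fun hcon => hne ((PySem.List.sorted_eq_nil_iff processors (fun x => x) false).mp hcon))
      (by
        rcases hterm with ⟨p, hp, hpp⟩ | ⟨hpos, hsum⟩
        · exact Or.inl ⟨p, hperm.mem_iff.mpr hp, hpp⟩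
        · exact Or.inr ⟨hpos, by
            rw [hfm.sum_eq, flatMap_chain_sum]; exact hsum⟩)
      (by rw [hfm.length_eq])]
  rw [sortDesc_congr_of_perm _ _ hfm]
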